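-- pv_equiv track=rewrite | github.com/yusuke-matsunaga/pigf | data/iptable/read.py | bits_to_str
-- ===== SOURCE A (Python) =====
-- def o2s(b) :
--     str = ""
--     bint = int(b)
--     for i in range(7, -1, -1) :
--         if bint & (1 << i) :
--             str += '1'
--         else :
--             str += '0'
--     return str
--
-- def bits_to_str(b1, b2, b3, b4, mask) :
--     tmp = o2s(b1) + o2s(b2) + o2s(b3) + o2s(b4)
--     rmask = 32 - mask
--     tmp2 = ""
--     for i in range(31, -1, -1) :
--         if i < rmask :
--             tmp2 += '*'
--         else :
--             tmp2 += tmp[31 - i]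
--     return tmp2
-- ===== SOURCE B (Python) =====
-- def bits_to_str(b1, b2, b3, b4, mask):
--     full = ''.join('{:08b}'.format(int(b) & 0xFF) for b in (b1, b2, b3, b4))
--     m = max(0, min(32, mask))
--     return full[:m] + '*' * (32 - m)
-- ===== Notes on version B (the rewrite author's own statement) =====
-- stated objective: simpler
-- what changed: B replaces A's two conditional character-append loops (bit loop in o2s, mask loop over 32 positions) by formatting the four low bytes directly into the 32-bit string and masking via a slice plus a repeated-'*' suffix with the mask clamped to [0,32].
import Mathlib
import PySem

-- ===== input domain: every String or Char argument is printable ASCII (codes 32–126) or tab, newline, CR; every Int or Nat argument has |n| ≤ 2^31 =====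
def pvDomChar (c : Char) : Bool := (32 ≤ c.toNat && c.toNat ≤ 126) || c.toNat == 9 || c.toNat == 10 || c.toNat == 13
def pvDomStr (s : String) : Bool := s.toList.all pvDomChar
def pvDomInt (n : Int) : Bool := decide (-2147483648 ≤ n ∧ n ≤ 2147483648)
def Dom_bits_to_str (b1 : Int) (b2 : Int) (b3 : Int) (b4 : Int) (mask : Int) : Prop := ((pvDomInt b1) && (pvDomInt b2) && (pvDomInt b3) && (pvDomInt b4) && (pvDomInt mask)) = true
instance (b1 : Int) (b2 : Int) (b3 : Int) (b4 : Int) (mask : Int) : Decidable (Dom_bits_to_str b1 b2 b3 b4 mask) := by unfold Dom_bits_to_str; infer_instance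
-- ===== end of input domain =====

-- B replaces A's two conditional character-append loops by formatting the four low bytes directly
-- into the full 32-bit string and masking with a slice plus a repeated-'*' suffix (objective: simpler).

-- ===== PORT A =====
-- o2s: for i in range(7,-1,-1): append '1' if bint & (1 << i) else '0'.
-- (the shift amount i.toNat is exact: every i drawn from the range is in [0,7])
def o2sA (b : Int) : List Char :=
  (PySem.List.pyRange 7 (-1) (-1)).foldl
    (fun s i => if PySem.Int.band b (1 <<< i.toNat) ≠ 0 then s ++ ['1'] else s ++ ['0']) []

-- tmp[31-i]: the index 31-i is always in [0,31] on the 32-char tmp, so the ' ' default of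
-- pyGetD is never used (Python raises no IndexError here).
def bits_to_str (b1 : Int) (b2 : Int) (b3 : Int) (b4 : Int) (mask : Int) : String :=
  let tmp := o2sA b1 ++ o2sA b2 ++ o2sA b3 ++ o2sA b4
  let rmask := 32 - mask
  let tmp2 := (PySem.List.pyRange 31 (-1) (-1)).foldl
    (fun s i => if i < rmask then s ++ ['*'] else s ++ [PySem.List.pyGetD tmp (31 - i) ' ']) []
  String.mk tmp2

-- ===== PORT B =====
-- '{:08b}'.format(n) for n = int(b) & 0xFF (so 0 ≤ n < 256): the 8 binary digits of n,
-- most significant first — ported as the corresponding bit-test map.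
def byteBinChar (b : Int) (j : Nat) : Char :=
  if (PySem.Int.band b 255).toNat.testBit j then '1' else '0'

def byteBin (b : Int) : List Char :=
  (List.range 8).map (fun j => byteBinChar b (7 - j))

-- full[:m] with m clamped to [0,32] is exactly List.take m.toNat; '*'*(32-m) is replicate.
def bits_to_str_alt (b1 : Int) (b2 : Int) (b3 : Int) (b4 : Int) (mask : Int) : String :=
  let full := byteBin b1 ++ byteBin b2 ++ byteBin b3 ++ byteBin b4
  let m := max 0 (min 32 mask)
  String.mk (full.take m.toNat ++ List.replicate (32 - m.toNat) '*')

-- ===== PRECONDITION & SPEC =====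
def Spec_bits_to_str (b1 : Int) (b2 : Int) (b3 : Int) (b4 : Int) (mask : Int) (out : String) : Prop := out = bits_to_str_alt b1 b2 b3 b4 mask
instance (b1 : Int) (b2 : Int) (b3 : Int) (b4 : Int) (mask : Int) (out : String) : Decidable (Spec_bits_to_str b1 b2 b3 b4 mask out) := by unfold Spec_bits_to_str; infer_instance

-- ===== CLAIM (what is proved, stated in full; the proofs are below) =====
def Claim_equal_bits_to_str : Prop := ∀ (b1 : Int) (b2 : Int) (b3 : Int) (b4 : Int) (mask : Int), Dom_bits_to_str b1 b2 b3 b4 mask → Spec_bits_to_str b1 b2 b3 b4 mask (bits_to_str b1 b2 b3 b4 mask)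

-- ===== LEMMAS AND PROOFS =====

set_option maxRecDepth 20000 in
lemma byte_bits : ∀ m, m < 256 → ∀ i, i < 8 →
    ((2 ^ i - (2 ^ i &&& m) ≠ 0) ↔ (255 - m).testBit i = true) := by
  decide

lemma testBit_255 (i : Nat) (h : i < 8) : Nat.testBit 255 i = true := by
  interval_cases i <;> decide

lemma pow_and_255 (i : Nat) (h : i < 8) : 2 ^ i &&& 255 = 2 ^ i := by
  interval_cases i <;> decide

-- the key bit fact: "b & (1 << i) is truthy"  =  bit i of (b & 0xFF)
lemma key_bit (b : Int) (i : Nat) (h : i < 8) :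
    (PySem.Int.band b (((1 <<< i : Nat) : Int)) ≠ 0) ↔
      (PySem.Int.band b 255).toNat.testBit i = true := by
  rcases le_total 0 b with hb | hb
  · rw [PySem.Int.band_of_nonneg hb (Int.natCast_nonneg _),
        PySem.Int.band_of_nonneg hb (by norm_num)]
    simp only [Int.toNat_natCast, ne_eq, Int.natCast_eq_zero,
        show ((255:Int).toNat) = 255 from rfl]
    rw [Nat.shiftLeft_eq, one_mul, Nat.and_two_pow, Nat.testBit_land, testBit_255 i h,
        Bool.and_true]
    cases hbit : b.toNat.testBit i <;> simp [hbit, (Nat.two_pow_pos i).ne']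
  · rcases eq_or_lt_of_le hb with hb0 | hb0
    · subst hb0
      simp only [show PySem.Int.band 0 (((1 <<< i : Nat) : Int)) = 0 from by
          rw [PySem.Int.band_comm]; exact PySem.Int.band_zero _,
        show PySem.Int.band 0 255 = 0 from by
          rw [PySem.Int.band_comm]; exact PySem.Int.band_zero _]
      simp [Nat.testBit]
    · have h1 : ¬ (0:Int) ≤ b := not_le.2 hb0
      simp only [PySem.Int.band, if_neg h1, if_pos (Int.natCast_nonneg (1 <<< i)),
          if_pos (show (0:Int) ≤ 255 by norm_num)]
      simp only [Int.toNat_natCast, ne_eq, Int.natCast_eq_zero,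
          show ((255:Int).toNat) = 255 from rfl]
      rw [Nat.shiftLeft_eq, one_mul]
      have e1 : 2 ^ i &&& (-b - 1).toNat = 2 ^ i &&& ((-b - 1).toNat &&& 255) := by
        rw [← pow_and_255 i h, Nat.and_assoc, Nat.and_assoc]
        congr 1
        conv_rhs => rw [Nat.and_comm 255 ((-b - 1).toNat &&& 255), Nat.and_assoc, Nat.and_self]
        exact Nat.and_comm _ _
      have e2 : 255 &&& (-b - 1).toNat = (-b - 1).toNat &&& 255 := Nat.and_comm _ _
      rw [e1, e2]
      exact byte_bits ((-b - 1).toNat &&& 255) (Nat.lt_succ_of_le Nat.and_le_right) i h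

lemma o2s_eq (b : Int) : o2sA b = byteBin b := by
  have hr : PySem.List.pyRange 7 (-1) (-1) = [7,6,5,4,3,2,1,0] := by decide
  have hb : byteBin b = [byteBinChar b 7, byteBinChar b 6, byteBinChar b 5, byteBinChar b 4,
      byteBinChar b 3, byteBinChar b 2, byteBinChar b 1, byteBinChar b 0] := rfl
  have hfun : (fun (s : List Char) (i : Int) =>
        if PySem.Int.band b (1 <<< i.toNat) ≠ 0 then s ++ ['1'] else s ++ ['0'])
      = fun s i => s ++ [if PySem.Int.band b (1 <<< i.toNat) ≠ 0 then '1' else '0'] := by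
    funext s i
    split <;> rfl
  rw [o2sA, hr, hfun, PySem.List.foldl_append_singleton_eq_map, List.nil_append, hb]
  simp only [List.map, List.cons.injEq, and_true]
  refine ⟨?_, ?_, ?_, ?_, ?_, ?_, ?_, ?_⟩ <;>
    exact if_congr (key_bit b _ (by norm_num)) rfl rfl

lemma mask_eq (mask : Int) (c0 c1 c2 c3 c4 c5 c6 c7 c8 c9 c10 c11 c12 c13 c14 c15 c16 c17 c18 c19 c20 c21 c22 c23 c24 c25 c26 c27 c28 c29 c30 c31 : Char) :
    (PySem.List.pyRange 31 (-1) (-1)).foldl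
      (fun s i => if i < 32 - mask then s ++ ['*']
                  else s ++ [PySem.List.pyGetD [c0, c1, c2, c3, c4, c5, c6, c7, c8, c9, c10, c11, c12, c13, c14, c15, c16, c17, c18, c19, c20, c21, c22, c23, c24, c25, c26, c27, c28, c29, c30, c31] (31 - i) ' ']) []
    = ([c0, c1, c2, c3, c4, c5, c6, c7, c8, c9, c10, c11, c12, c13, c14, c15, c16, c17, c18, c19, c20, c21, c22, c23, c24, c25, c26, c27, c28, c29, c30, c31].take (max 0 (min 32 mask)).toNat)
      ++ List.replicate (32 - (max 0 (min 32 mask)).toNat) '*' := by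
  have hr : PySem.List.pyRange 31 (-1) (-1) = [31, 30, 29, 28, 27, 26, 25, 24, 23, 22, 21, 20, 19, 18, 17, 16, 15, 14, 13, 12, 11, 10, 9, 8, 7, 6, 5, 4, 3, 2, 1, 0] := by decide
  have hfun : (fun (s : List Char) (i : Int) =>
        if i < 32 - mask then s ++ ['*'] else s ++ [PySem.List.pyGetD [c0, c1, c2, c3, c4, c5, c6, c7, c8, c9, c10, c11, c12, c13, c14, c15, c16, c17, c18, c19, c20, c21, c22, c23, c24, c25, c26, c27, c28, c29, c30, c31] (31 - i) ' '])
      = fun s i => s ++ [if i < 32 - mask then '*' else PySem.List.pyGetD [c0, c1, c2, c3, c4, c5, c6, c7, c8, c9, c10, c11, c12, c13, c14, c15, c16, c17, c18, c19, c20, c21, c22, c23, c24, c25, c26, c27, c28, c29, c30, c31] (31 - i) ' '] := by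
    funext s i
    split <;> rfl
  rw [hr, hfun, PySem.List.foldl_append_singleton_eq_map, List.nil_append]
  by_cases h : mask ≤ 0
  · have hm : max 0 (min 32 mask) = 0 := by omega
    rw [hm, List.map_congr_left (g := fun _ => '*') ?_]
    · rfl
    · intro x hx
      rw [if_pos]
      simp only [List.mem_cons, List.not_mem_nil, or_false] at hx
      omega
  · by_cases h2 : 32 ≤ mask
    · have hm : max 0 (min 32 mask) = 32 := by omega
      rw [hm, List.map_congr_left (g := fun i => PySem.List.pyGetD [c0, c1, c2, c3, c4, c5, c6, c7, c8, c9, c10, c11, c12, c13, c14, c15, c16, c17, c18, c19, c20, c21, c22, c23, c24, c25, c26, c27, c28, c29, c30, c31] (31 - i) ' ') ?_]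
      · rfl
      · intro x hx
        rw [if_neg]
        simp only [List.mem_cons, List.not_mem_nil, or_false] at hx
        omega
    · push_neg at h h2
      interval_cases mask <;> rfl

-- ===== VERDICT (by name: the statement is the Claim_ definition above) =====
theorem bits_to_str_spec : Claim_equal_bits_to_str := by
  intro b1 b2 b3 b4 mask _
  show bits_to_str b1 b2 b3 b4 mask = bits_to_str_alt b1 b2 b3 b4 mask
  rw [bits_to_str, bits_to_str_alt, o2s_eq, o2s_eq, o2s_eq, o2s_eq]
  exact congrArg String.mk (mask_eq mask _ _ _ _ _ _ _ _ _ _ _ _ _ _ _ _ _ _ _ _ _ _ _ _ _ _ _ _ _ _ _ _)
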